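-- pv_equiv track=rewrite | github.com/SP3CTR021/LAB_EXAM1 | PROBLEM 3.py | get_network
-- ===== SOURCE A (Python) =====
-- def get_network(mobile_number):
--     # Dictionary of networks with their key digits
--     networks = {
--         "Smart": ["13", "14", "20", "21", "28", "29", "30"],
--         "TNT": ["09", "10", "11", "12", "18", "19"],
--         "Sun": ["22", "23", "32", "33"],
--         "Globe": ["15", "16", "17", "25", "26", "27"],
--         "TM": ["03", "04", "05", "06", "07"],
--         "Red": ["01", "02", "24"],
--         "Dito": ["91", "92", "93", "94", "95", "96", "97", "98"]
--     }
--
--     # Check if input is valid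
--     if len(mobile_number) != 11 or not mobile_number.isdigit():
--         return "Invalid number! Must be 11 digits."
--
--     if not mobile_number.startswith("09"):
--         return "Invalid number! Must start with 09."
--
--     # Extract key digits (3rd and 4th digit)
--     key = mobile_number[2:4]
--
--     # Find matching network
--     for network, keys in networks.items():
--         if key in keys:
--             return f"The network of the mobile number is {network}"
--
--     return "Unknown network!"
-- ===== SOURCE B (Python) =====
-- # Arithmetic classification: parse the key digits as an integer and decide the
-- # network by range comparisons -- no dictionary and no scan over networks at all.
-- def get_network(mobile_number):
--     if len(mobile_number) != 11 or not mobile_number.isdigit():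
--         return "Invalid number! Must be 11 digits."
--     if not mobile_number.startswith("09"):
--         return "Invalid number! Must start with 09."
--     k = int(mobile_number[2:4])
--     if 1 <= k <= 2 or k == 24:
--         name = "Red"
--     elif 3 <= k <= 7:
--         name = "TM"
--     elif 9 <= k <= 12 or 18 <= k <= 19:
--         name = "TNT"
--     elif 13 <= k <= 14 or 20 <= k <= 21 or 28 <= k <= 30:
--         name = "Smart"
--     elif 15 <= k <= 17 or 25 <= k <= 27:
--         name = "Globe"
--     elif 22 <= k <= 23 or 32 <= k <= 33:
--         name = "Sun"
--     elif 91 <= k <= 98: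
--         name = "Dito"
--     else:
--         return "Unknown network!"
--     return f"The network of the mobile number is {name}"
-- ===== Notes on version B (the rewrite author's own statement) =====
-- stated objective: alternative
-- what changed: The network dictionary and the membership-scan loop are gone entirely: B parses the two key digits as an integer and classifies it by a chain of numeric range comparisons, so no table or container lookup remains.
import Mathlib
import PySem

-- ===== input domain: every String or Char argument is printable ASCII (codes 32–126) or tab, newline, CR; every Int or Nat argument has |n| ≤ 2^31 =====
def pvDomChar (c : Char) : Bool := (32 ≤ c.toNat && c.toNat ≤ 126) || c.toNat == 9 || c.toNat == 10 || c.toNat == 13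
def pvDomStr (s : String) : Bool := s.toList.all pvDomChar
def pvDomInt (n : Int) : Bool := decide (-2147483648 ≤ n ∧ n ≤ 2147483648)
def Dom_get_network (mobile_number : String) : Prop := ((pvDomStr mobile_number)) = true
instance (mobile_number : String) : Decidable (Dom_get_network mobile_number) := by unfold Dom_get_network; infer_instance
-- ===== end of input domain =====

-- B drops the network dictionary and its membership-scan loop entirely: it parses the two key
-- digits as an integer and classifies it by a chain of numeric range comparisons (objective: alternative).

-- ===== PORT A =====
def networksA : List (String × List String) :=
  [("Smart", ["13", "14", "20", "21", "28", "29", "30"]),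
   ("TNT", ["09", "10", "11", "12", "18", "19"]),
   ("Sun", ["22", "23", "32", "33"]),
   ("Globe", ["15", "16", "17", "25", "26", "27"]),
   ("TM", ["03", "04", "05", "06", "07"]),
   ("Red", ["01", "02", "24"]),
   ("Dito", ["91", "92", "93", "94", "95", "96", "97", "98"])]

-- the 'for network, keys in networks.items(): if key in keys: return …' loop
def findNetwork (key : String) : List (String × List String) → String
  | [] => "Unknown network!"
  | (n, ks) :: rest =>
    if ks.contains key then "The network of the mobile number is " ++ n
    else findNetwork key rest

def get_network (mobile_number : String) : String :=
  if PySem.Str.len mobile_number ≠ 11 ∨ PySem.Str.strIsdigit mobile_number = false then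
    "Invalid number! Must be 11 digits."
  else if PySem.Str.startswith mobile_number "09" = false then
    "Invalid number! Must start with 09."
  else
    findNetwork (PySem.Str.slice mobile_number (some 2) (some 4)) networksA

-- ===== PORT B =====
-- the if/elif range chain of Source B (k = int(key); return value assembled from `name`)
def classifyB (k : Int) : String :=
  if (1 ≤ k ∧ k ≤ 2) ∨ k = 24 then "The network of the mobile number is Red"
  else if 3 ≤ k ∧ k ≤ 7 then "The network of the mobile number is TM"
  else if (9 ≤ k ∧ k ≤ 12) ∨ (18 ≤ k ∧ k ≤ 19) then "The network of the mobile number is TNT"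
  else if (13 ≤ k ∧ k ≤ 14) ∨ (20 ≤ k ∧ k ≤ 21) ∨ (28 ≤ k ∧ k ≤ 30) then "The network of the mobile number is Smart"
  else if (15 ≤ k ∧ k ≤ 17) ∨ (25 ≤ k ∧ k ≤ 27) then "The network of the mobile number is Globe"
  else if (22 ≤ k ∧ k ≤ 23) ∨ (32 ≤ k ∧ k ≤ 33) then "The network of the mobile number is Sun"
  else if 91 ≤ k ∧ k ≤ 98 then "The network of the mobile number is Dito"
  else "Unknown network!"

def get_network_alt (mobile_number : String) : String :=
  if PySem.Str.len mobile_number ≠ 11 ∨ PySem.Str.strIsdigit mobile_number = false then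
    "Invalid number! Must be 11 digits."
  else if PySem.Str.startswith mobile_number "09" = false then
    "Invalid number! Must start with 09."
  else
    -- int(mobile_number[2:4]) cannot raise here (the isdigit guard makes the slice all digits),
    -- so the unreachable ValueError branch of ofStr? is defaulted
    classifyB ((PySem.Int.ofStr? (PySem.Str.slice mobile_number (some 2) (some 4))).getD 0)

-- ===== PRECONDITION & SPEC =====
def Spec_get_network (mobile_number : String) (out : String) : Prop := out = get_network_alt mobile_number
instance (mobile_number : String) (out : String) : Decidable (Spec_get_network mobile_number out) := by unfold Spec_get_network; infer_instance

-- ===== CLAIM (what is proved, stated in full; the proofs are below) =====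
def Claim_equal_get_network : Prop := ∀ (mobile_number : String), Dom_get_network mobile_number → Spec_get_network mobile_number (get_network mobile_number)

-- ===== LEMMAS AND PROOFS =====

lemma digit_mem (c : Char) (h : PySem.Chars.isdigit c = true) :
    c ∈ ['0','1','2','3','4','5','6','7','8','9'] := by
  simp [PySem.Chars.isdigit] at h
  obtain ⟨h1, h2⟩ := h
  have hv : c.val.toNat ≤ 57 := by
    have := (UInt32.le_iff_toNat_le).mp h2; simpa using this
  have hv2 : 48 ≤ c.val.toNat := by
    have := (UInt32.le_iff_toNat_le).mp h1; simpa using this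
  interval_cases h : c.val.toNat <;>
    simp_all [List.mem_cons, Char.ext_iff, UInt32.ext_iff, ← h]

-- on any two-digit key, A's scan over the network lists agrees with B's range chain
set_option maxRecDepth 8192 in
lemma scan_eq_classify (c d : Char)
    (hc : PySem.Chars.isdigit c = true) (hd : PySem.Chars.isdigit d = true) :
    findNetwork (String.ofList [c, d]) networksA =
      classifyB ((PySem.Int.ofStr? (String.ofList [c, d])).getD 0) := by
  have hc' := digit_mem c hc
  have hd' := digit_mem d hd
  fin_cases hc' <;> fin_cases hd' <;> decide

-- ===== VERDICT (by name: the statement is the Claim_ definition above) =====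
set_option maxRecDepth 8192 in
theorem get_network_spec : Claim_equal_get_network := by
  intro s _
  unfold Spec_get_network get_network get_network_alt
  split_ifs with h1 h2
  · rfl
  · rfl
  · rw [not_or, Bool.not_eq_false] at h1
    obtain ⟨hlen, hdig⟩ := h1
    have hlen11 : s.toList.length = 11 := by
      rw [not_not, PySem.Str.len_eq] at hlen; exact_mod_cast hlen
    have hall : ∀ x ∈ s.toList, PySem.Chars.isdigit x = true := by
      rw [PySem.Str.strIsdigit_eq, PySem.Chars.strIsdigit] at hdig
      simp at hdig
      exact hdig.2
    obtain ⟨a0, t0, h0⟩ := List.exists_cons_of_ne_nil (by intro h; rw [h] at hlen11; simp at hlen11 : s.toList ≠ [])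
    have hl0 : t0.length = 10 := by have := hlen11; rw [h0] at this; simpa using this
    obtain ⟨a1, t1, h1'⟩ := List.exists_cons_of_ne_nil (by simp [← List.length_pos_iff, hl0] : t0 ≠ [])
    have hl1 : t1.length = 9 := by have := hl0; rw [h1'] at this; simpa using this
    obtain ⟨a2, t2, h2'⟩ := List.exists_cons_of_ne_nil (by simp [← List.length_pos_iff, hl1] : t1 ≠ [])
    have hl2 : t2.length = 8 := by have := hl1; rw [h2'] at this; simpa using this
    obtain ⟨a3, t3, h3'⟩ := List.exists_cons_of_ne_nil (by simp [← List.length_pos_iff, hl2] : t2 ≠ [])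
    have hkey : PySem.Str.slice s (some 2) (some 4) = String.ofList [a2, a3] := by
      apply String.toList_inj.mp
      rw [PySem.Str.toList_slice, PySem.Chars.slice_eq_listSlice]
      rw [show ((2:Int)) = ((2:Nat):Int) by norm_num, show ((4:Int)) = ((4:Nat):Int) by norm_num]
      rw [PySem.List.slice_natCast, h0, h1', h2', h3']
      simp
    rw [hkey]
    have hc : PySem.Chars.isdigit a2 = true := hall a2 (by rw [h0, h1', h2']; simp)
    have hd : PySem.Chars.isdigit a3 = true := hall a3 (by rw [h0, h1', h2', h3']; simp)
    exact scan_eq_classify a2 a3 hc hd
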